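-- pv_equiv track=rewrite | github.com/Kasiet2001/leetcode | max_points_tourist_can_earn.py | treeSubtreeSizes
-- ===== SOURCE A (Python) =====
-- from collections import defaultdict, deque
--
-- def treeSubtreeSizes(parent, s):
--     n = len(parent)
--     tree = defaultdict(list)
--     for i in range(1, n):
--         tree[parent[i]].append(i)
--
--     new_tree = defaultdict(list)
--     closest_ancestor = {}
--
--     def dfs_update(node):
--         char = s[node]
--         original_parent = parent[node]
--
--         if char in closest_ancestor:
--             new_parent = closest_ancestor[char]
--             new_tree[new_parent].append(node)
--         else:
--             new_tree[original_parent].append(node)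
--
--         prev_ancestor = closest_ancestor.get(char)
--         closest_ancestor[char] = node
--
--         for child in tree[node]:
--             dfs_update(child)
--
--         if prev_ancestor is None:
--             del closest_ancestor[char]
--         else:
--             closest_ancestor[char] = prev_ancestor
--
--     dfs_update(0)
--
--     subtree_size = [0] * n
--
--     def dfs_size(node):
--         size = 1
--         for child in new_tree[node]:
--             size += dfs_size(child)
--         subtree_size[node] = size
--         return size
--
--     dfs_size(0)
--
--     return subtree_size
-- ===== SOURCE B (Python) =====
-- from collections import defaultdict
--
-- def treeSubtreeSizes(parent, s):
--     n = len(parent)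
--     children = defaultdict(list)
--     for i in range(1, n):
--         children[parent[i]].append(i)
--
--     new_parent = {}   # node -> its parent in the rewired tree (None for the root)
--     order = []        # discovery order of the visited nodes
--
--     def dfs(node, closest):
--         # closest maps each character to the nearest ancestor carrying it
--         c = s[node]
--         if c in closest:
--             new_parent[node] = closest[c]
--         elif node:
--             new_parent[node] = parent[node]
--         else:
--             new_parent[node] = None
--         order.append(node)
--         closest = dict(closest)
--         closest[c] = node
--         for child in children[node]:
--             dfs(child, closest)
--
--     dfs(0, {})
--
--     # each visited node contributes 1 to every node on its rewired ancestor chain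
--     size = [0] * n
--     for u in order:
--         v = u
--         while v is not None:
--             size[v] += 1
--             v = new_parent[v]
--     return size
-- ===== Notes on version B (the rewrite author's own statement) =====
-- stated objective: alternative
-- what changed: B passes the closest-ancestor map down the rewiring DFS functionally (no mutate/restore) recording only each node's rewired parent and the discovery order, and replaces A's rewired adjacency dict plus second size-DFS by a counting pass that walks each visited node's rewired ancestor chain, adding 1 to every node on it.
-- outside the precondition, e.g. on treeSubtreeSizes([-1, 5], 'a'): A returns [1, 0], B returns [1, 0]; on treeSubtreeSizes([1, 5], 'ab'): A returns [1, 0], B returns [1, 0]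
import Mathlib
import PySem

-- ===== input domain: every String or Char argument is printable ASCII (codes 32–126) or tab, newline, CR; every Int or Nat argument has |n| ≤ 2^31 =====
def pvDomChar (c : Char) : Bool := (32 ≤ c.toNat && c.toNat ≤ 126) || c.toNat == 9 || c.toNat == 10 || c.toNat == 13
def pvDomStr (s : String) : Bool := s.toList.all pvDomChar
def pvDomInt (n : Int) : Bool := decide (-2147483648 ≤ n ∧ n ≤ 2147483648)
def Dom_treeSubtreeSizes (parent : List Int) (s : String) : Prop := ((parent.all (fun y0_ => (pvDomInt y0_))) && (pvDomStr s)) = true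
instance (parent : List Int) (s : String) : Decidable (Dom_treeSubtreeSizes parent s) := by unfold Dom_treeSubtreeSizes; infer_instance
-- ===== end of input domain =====

-- B replaces A's second DFS and the rewired adjacency dict by a per-node walk up the
-- rewired parent chain, counting each visited node into every chain ancestor (objective:
-- alternative decomposition; the rewiring DFS itself passes the ancestor map down
-- functionally instead of mutating and restoring one shared dict).

-- ===== PORT A =====

-- tree/children = defaultdict(list); for i in range(1, n): d[parent[i]].append(i)
-- (the same build loop appears verbatim in both Pythons, so both ports share this helper)
def pvChildrenDict (parent : List Int) : PySem.Dict Int (List Int) :=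
  (PySem.List.pyRange 1 (PySem.List.len parent) 1).foldl
    (fun d i => d.modify (PySem.List.pyGetD parent i 0) [] (fun l => l ++ [i]))
    PySem.Dict.empty

-- dfs_update: state = (new_tree, closest_ancestor); fuel only makes the recursion
-- structural (the DFS depth never exceeds n, so fuel n+1 never runs out).
def pvA_dfsUpdate (parent : List Int) (ns : List Char) (tree : PySem.Dict Int (List Int)) :
    Nat → Int → PySem.Dict Int (List Int) × PySem.Dict Char Int →
      PySem.Dict Int (List Int) × PySem.Dict Char Int
  | 0, _, st => st
  | fuel+1, node, st =>
    match PySem.List.pyGet? ns node with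
    | none => st      -- s[node]: IndexError; excluded by Pre_
    | some ch =>
      let originalParent := PySem.List.pyGetD parent node 0
      let nt :=
        match st.2.get? ch with
        | some np => st.1.modify np [] (fun l => l ++ [node])
        | none => st.1.modify originalParent [] (fun l => l ++ [node])
      let prev := st.2.get? ch
      let ca := st.2.insert ch node
      let st2 := (tree.getD node []).foldl
        (fun st' child => pvA_dfsUpdate parent ns tree fuel child st') (nt, ca)
      match prev with
      | none => (st2.1, st2.2.erase ch)
      | some p => (st2.1, st2.2.insert ch p)

-- dfs_size: returns (updated subtree_size list, size of node's subtree)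
def pvA_dfsSize (nt : PySem.Dict Int (List Int)) :
    Nat → Int → List Int → List Int × Int
  | 0, _, sz => (sz, 0)
  | fuel+1, node, sz =>
    let res := (nt.getD node []).foldl
      (fun (acc : List Int × Int) child =>
        let r := pvA_dfsSize nt fuel child acc.1
        (r.1, acc.2 + r.2))
      (sz, 1)
    (PySem.List.pySetD res.1 node res.2, res.2)

def treeSubtreeSizes (parent : List Int) (s : String) : List Int :=
  let n := parent.length
  let tree := pvChildrenDict parent
  let st := pvA_dfsUpdate parent s.toList tree (n+1) 0 (PySem.Dict.empty, PySem.Dict.empty)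
  (pvA_dfsSize st.1 (n+1) 0 (List.replicate n (0 : Int))).1

-- ===== PORT B =====

-- dfs(node, closest): closest is passed down (copied), (new_parent, order) accumulate
def pvB_dfs (parent : List Int) (ns : List Char) (children : PySem.Dict Int (List Int)) :
    Nat → Int → PySem.Dict Char Int → PySem.Dict Int (Option Int) × List Int →
      PySem.Dict Int (Option Int) × List Int
  | 0, _, _, acc => acc
  | fuel+1, node, closest, acc =>
    match PySem.List.pyGet? ns node with
    | none => acc     -- s[node]: IndexError; excluded by Pre_
    | some c =>
      let np : Option Int :=
        match closest.get? c with
        | some a => some a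
        | none => if node ≠ 0 then some (PySem.List.pyGetD parent node 0) else none
      let acc1 := (acc.1.insert node np, acc.2 ++ [node])
      let closest1 := closest.insert c node
      (children.getD node []).foldl
        (fun acc' child => pvB_dfs parent ns children fuel child closest1 acc') acc1

-- v = u; while v is not None: size[v] += 1; v = new_parent[v]
def pvB_chase (npd : PySem.Dict Int (Option Int)) :
    Nat → Int → List Int → List Int
  | 0, _, sz => sz
  | fuel+1, v, sz =>
    let sz1 := PySem.List.pySetD sz v (PySem.List.pyGetD sz v 0 + 1)
    match npd.getD v none with
    | some p => pvB_chase npd fuel p sz1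
    | none => sz1

def treeSubtreeSizes_alt (parent : List Int) (s : String) : List Int :=
  let n := parent.length
  let children := pvChildrenDict parent
  let res := pvB_dfs parent s.toList children (n+1) 0 PySem.Dict.empty (PySem.Dict.empty, [])
  res.2.foldl (fun sz u => pvB_chase res.1 (n+1) u sz) (List.replicate n (0 : Int))

-- ===== PRECONDITION & SPEC =====

-- Pre_ excludes: (a) empty parent and strings shorter than parent, where A hits an
-- IndexError on s[node]/parent[0] (when s is short but still covers every node the DFS
-- actually reaches — unreachable nodes have high indices — A returns and B agrees; that
-- corner is excluded only because reachability is not a closed-form condition);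
-- (b) parent[0] pointing at a node index, where A either recurses forever (RecursionError,
-- when that node is reachable) or returns a value B agrees with (when it is not).
def Pre_treeSubtreeSizes (parent : List Int) (s : String) : Prop :=
  1 ≤ parent.length ∧ (parent.length : Int) ≤ PySem.Str.len s ∧
    ¬ (0 ≤ PySem.List.pyGetD parent 0 0 ∧ PySem.List.pyGetD parent 0 0 < (parent.length : Int))
instance (parent : List Int) (s : String) : Decidable (Pre_treeSubtreeSizes parent s) := by
  unfold Pre_treeSubtreeSizes; infer_instance

def pvWitness_treeSubtreeSizes : List Int × String := ([-1, 0, 0, 1], "abab")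

def Spec_treeSubtreeSizes (parent : List Int) (s : String) (out : List Int) : Prop :=
  out = treeSubtreeSizes_alt parent s
instance (parent : List Int) (s : String) (out : List Int) :
    Decidable (Spec_treeSubtreeSizes parent s out) := by unfold Spec_treeSubtreeSizes; infer_instance

-- ===== CLAIM (what is proved, stated in full; the proofs are below) =====
def Claim_equal_treeSubtreeSizes : Prop :=
  ∀ (parent : List Int) (s : String), Dom_treeSubtreeSizes parent s →
    Pre_treeSubtreeSizes parent s →
    Spec_treeSubtreeSizes parent s (treeSubtreeSizes parent s)

-- ===== LEMMAS AND PROOFS =====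

-- ===== specs =====
def pvKey (parent : List Int) (p : Int × Option Int) : Int :=
  match p.2 with
  | some a => a
  | none => PySem.List.pyGetD parent p.1 0

def pvNP (parent : List Int) (p : Int × Option Int) : Option Int :=
  match p.2 with
  | some a => some a
  | none => if p.1 ≠ 0 then some (PySem.List.pyGetD parent p.1 0) else none

def pvVisits (ns : List Char) (tr : PySem.Dict Int (List Int)) :
    Nat → Int → (Char → Option Int) → List (Int × Option Int)
  | 0, _, _ => []
  | fuel+1, node, ca =>
    match PySem.List.pyGet? ns node with
    | none => []
    | some ch =>
      (node, ca ch) ::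
        (tr.getD node []).flatMap
          (fun c => pvVisits ns tr fuel c (fun c' => if c' = ch then some node else ca c'))

-- get? through erase
theorem pv_get?_erase {κ ν : Type} [DecidableEq κ] (d : PySem.Dict κ ν) (k k' : κ) :
    (d.erase k).get? k' = if k' = k then none else d.get? k' := by
  cases d with
  | mk items =>
    induction items with
    | nil => simp [PySem.Dict.erase, PySem.Dict.get?]
    | cons p rest ih =>
      simp only [PySem.Dict.erase, PySem.Dict.get?] at *
      simp only [List.filter_cons, List.find?_cons]
      by_cases h1 : p.1 = k <;> by_cases h2 : p.1 = k' <;> by_cases h3 : k' = k <;>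
        simp_all [show ∀ a b : κ, (a == b) = decide (a = b) from fun _ _ => rfl]

-- ===== phase 1, port A =====
theorem pvA_dfsUpdate_eq (parent : List Int) (ns : List Char) (tr : PySem.Dict Int (List Int)) :
    ∀ (fuel : Nat) (node : Int) (nt : PySem.Dict Int (List Int)) (ca : PySem.Dict Char Int)
      (caF : Char → Option Int), (∀ c, ca.get? c = caF c) →
      ∃ ca', pvA_dfsUpdate parent ns tr fuel node (nt, ca) =
          ((pvVisits ns tr fuel node caF).foldl
              (fun d p => d.modify (pvKey parent p) [] (fun l => l ++ [p.1])) nt, ca')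
        ∧ ∀ c, ca'.get? c = ca.get? c := by
  intro fuel
  induction fuel with
  | zero => intro node nt ca caF hca; exact ⟨ca, by simp [pvA_dfsUpdate, pvVisits], fun _ => rfl⟩
  | succ fuel ih =>
    intro node nt ca caF hca
    cases hg : PySem.List.pyGet? ns node with
    | none => exact ⟨ca, by simp [pvA_dfsUpdate, pvVisits, hg], fun _ => rfl⟩
    | some ch =>
      have hloop : ∀ (cs : List Int) (nt1 : PySem.Dict Int (List Int)) (ca1 : PySem.Dict Char Int),
          (∀ c, ca1.get? c = (fun c' => if c' = ch then some node else caF c') c) →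
          ∃ ca', cs.foldl (fun st' child => pvA_dfsUpdate parent ns tr fuel child st') (nt1, ca1)
              = ((cs.flatMap (fun c => pvVisits ns tr fuel c
                    (fun c' => if c' = ch then some node else caF c'))).foldl
                  (fun d p => d.modify (pvKey parent p) [] (fun l => l ++ [p.1])) nt1, ca')
            ∧ ∀ c, ca'.get? c = ca1.get? c := by
        intro cs
        induction cs with
        | nil => intro nt1 ca1 _; exact ⟨ca1, by simp, fun _ => rfl⟩
        | cons c0 cs ihc =>
          intro nt1 ca1 h1
          obtain ⟨ca2, heq2, hget2⟩ := ih c0 nt1 ca1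
            (fun c' => if c' = ch then some node else caF c') h1
          obtain ⟨ca3, heq3, hget3⟩ := ihc
            (List.foldl (fun d p => d.modify (pvKey parent p) [] (fun l => l ++ [p.1])) nt1
              (pvVisits ns tr fuel c0 (fun c' => if c' = ch then some node else caF c')))
            ca2 (fun c => (hget2 c).trans (h1 c))
          refine ⟨ca3, ?_, fun c => (hget3 c).trans (hget2 c)⟩
          rw [List.foldl_cons, heq2, heq3, List.flatMap_cons, List.foldl_append]
      obtain ⟨ca', hloopeq, hget'⟩ := hloop (tr.getD node [])
        (nt.modify (pvKey parent (node, caF ch)) [] (fun l => l ++ [node])) (ca.insert ch node)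
        (fun c => by by_cases hc : c = ch <;>
          simp [PySem.Dict.get?_insert, hc, hca c])
      cases hprev : ca.get? ch with
      | none =>
        have hcaF : caF ch = none := by rw [← hca ch, hprev]
        have hkey : pvKey parent (node, caF ch) = PySem.List.pyGetD parent node 0 := by
          simp [pvKey, hcaF]
        rw [hkey] at hloopeq
        refine ⟨ca'.erase ch, ?_, fun c => ?_⟩
        · show pvA_dfsUpdate parent ns tr (fuel+1) node (nt, ca) = _
          simp only [pvA_dfsUpdate, hg, hprev, hloopeq]
          simp only [pvVisits, hg, List.foldl_cons, hkey]
        · rw [pv_get?_erase]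
          by_cases hc : c = ch
          · simp [hc, hprev]
          · have := hget' c
            rw [PySem.Dict.get?_insert] at this
            simp [hc] at this
            simp [hc, this]
      | some pr =>
        have hcaF : caF ch = some pr := by rw [← hca ch, hprev]
        have hkey : pvKey parent (node, caF ch) = pr := by simp [pvKey, hcaF]
        rw [hkey] at hloopeq
        refine ⟨ca'.insert ch pr, ?_, fun c => ?_⟩
        · show pvA_dfsUpdate parent ns tr (fuel+1) node (nt, ca) = _
          simp only [pvA_dfsUpdate, hg, hprev, hloopeq]
          simp only [pvVisits, hg, List.foldl_cons, hkey]
        · rw [PySem.Dict.get?_insert]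
          by_cases hc : c = ch
          · simp [hc, hprev]
          · have := hget' c
            rw [PySem.Dict.get?_insert] at this
            simp [hc] at this
            simp [hc, this]

-- ===== phase 1, port B =====
theorem pvB_dfs_eq (parent : List Int) (ns : List Char) (tr : PySem.Dict Int (List Int)) :
    ∀ (fuel : Nat) (node : Int) (cb : PySem.Dict Char Int) (caF : Char → Option Int)
      (acc : PySem.Dict Int (Option Int) × List Int), (∀ c, cb.get? c = caF c) →
      pvB_dfs parent ns tr fuel node cb acc =
        ((pvVisits ns tr fuel node caF).foldl (fun d p => d.insert p.1 (pvNP parent p)) acc.1,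
         acc.2 ++ (pvVisits ns tr fuel node caF).map Prod.fst) := by
  intro fuel
  induction fuel with
  | zero => intro node cb caF acc _; simp [pvB_dfs, pvVisits]
  | succ fuel ih =>
    intro node cb caF acc hca
    cases hg : PySem.List.pyGet? ns node with
    | none => simp [pvB_dfs, pvVisits, hg]
    | some ch =>
      have hnp : (match cb.get? ch with
          | some a => some a
          | none => if node ≠ 0 then some (PySem.List.pyGetD parent node 0) else none)
          = pvNP parent (node, caF ch) := by
        rw [hca ch]; cases caF ch <;> simp [pvNP]
      have hloop : ∀ (cs : List Int) (acc1 : PySem.Dict Int (Option Int) × List Int),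
          cs.foldl (fun acc' child => pvB_dfs parent ns tr fuel child (cb.insert ch node) acc') acc1
            = ((cs.flatMap (fun c => pvVisits ns tr fuel c
                  (fun c' => if c' = ch then some node else caF c'))).foldl
                (fun d p => d.insert p.1 (pvNP parent p)) acc1.1,
               acc1.2 ++ (cs.flatMap (fun c => pvVisits ns tr fuel c
                  (fun c' => if c' = ch then some node else caF c'))).map Prod.fst) := by
        intro cs
        induction cs with
        | nil => intro acc1; simp
        | cons c0 cs ihc =>
          intro acc1
          rw [List.foldl_cons,
            ih c0 (cb.insert ch node) (fun c' => if c' = ch then some node else caF c') acc1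
              (fun c => by
                by_cases hc : c = ch <;> simp [PySem.Dict.get?_insert, hc, hca c]),
            ihc]
          simp [List.foldl_append, List.append_assoc]
      show pvB_dfs parent ns tr (fuel+1) node cb acc = _
      simp only [pvB_dfs, hg, hnp, hloop]
      simp only [pvVisits, hg, List.foldl_cons, List.map_cons]
      simp [List.append_assoc]

-- ===== the discovery list (spec) =====
def pvDesc (ns : List Char) (tr : PySem.Dict Int (List Int)) : Nat → Int → List Int
  | 0, _ => []
  | fuel+1, node =>
    match PySem.List.pyGet? ns node with
    | none => []
    | some _ => node :: (tr.getD node []).flatMap (pvDesc ns tr fuel)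

theorem pvVisits_map_fst (ns : List Char) (tr : PySem.Dict Int (List Int)) :
    ∀ (fuel : Nat) (node : Int) (ca : Char → Option Int),
      (pvVisits ns tr fuel node ca).map Prod.fst = pvDesc ns tr fuel node := by
  intro fuel
  induction fuel with
  | zero => intro node ca; simp [pvVisits, pvDesc]
  | succ fuel ih =>
    intro node ca
    cases hg : PySem.List.pyGet? ns node with
    | none => simp [pvVisits, pvDesc, hg]
    | some ch =>
      simp only [pvVisits, pvDesc, hg, List.map_cons, List.map_flatMap]
      congr 1
      exact List.flatMap_congr (fun c _ => ih c _)

-- ===== old-tree adjacency =====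
theorem pvChildrenDict_getD (parent : List Int) (k : Int) :
    (pvChildrenDict parent).getD k [] =
      (PySem.List.pyRange 1 (parent.length : Int) 1).filter
        (fun i => PySem.List.pyGetD parent i 0 == k) := by
  unfold pvChildrenDict
  have h := PySem.Dict.getD_foldl_modify_append
    ((PySem.List.pyRange 1 (PySem.List.len parent) 1).map
      (fun i => (PySem.List.pyGetD parent i 0, i)))
    (PySem.Dict.empty : PySem.Dict Int (List Int)) k
  rw [List.foldl_map] at h
  rw [h]
  simp [PySem.Dict.getD_empty, List.filter_map, Function.comp_def, PySem.List.len_eq]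

theorem pv_mem_tree (parent : List Int) (k c : Int) :
    c ∈ (pvChildrenDict parent).getD k [] ↔
      (1 ≤ c ∧ c < (parent.length : Int) ∧ PySem.List.pyGetD parent c 0 = k) := by
  rw [pvChildrenDict_getD]
  simp [List.mem_filter, PySem.List.mem_pyRange_one]
  tauto

theorem pv_tree_nodup (parent : List Int) (k : Int) :
    ((pvChildrenDict parent).getD k []).Nodup := by
  rw [pvChildrenDict_getD]
  exact (PySem.List.nodup_pyRange_one 1 (parent.length : Int)).filter _

-- ===== walking up the original parent chain =====
def pvUpIt (parent : List Int) : Nat → Int → Int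
  | 0, x => x
  | k+1, x =>
    if 1 ≤ x ∧ x < (parent.length : Int) then pvUpIt parent k (PySem.List.pyGetD parent x 0)
    else x

theorem pvUpIt_stuck (parent : List Int) (x : Int)
    (h : ¬(1 ≤ x ∧ x < (parent.length : Int))) : ∀ k, pvUpIt parent k x = x := by
  intro k
  induction k with
  | zero => rfl
  | succ k _ => simp [pvUpIt, h]

theorem pvUpIt_zero_left (parent : List Int) (k : Nat) : pvUpIt parent k 0 = 0 :=
  pvUpIt_stuck parent 0 (by omega) k

theorem pvUpIt_succ (parent : List Int) (k : Nat) (x : Int) :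
    pvUpIt parent (k+1) x =
      (if 1 ≤ x ∧ x < (parent.length : Int)
        then pvUpIt parent k (PySem.List.pyGetD parent x 0) else x) := rfl

theorem pvUpIt_add (parent : List Int) (j : Nat) :
    ∀ (k : Nat) (x : Int), pvUpIt parent (j + k) x = pvUpIt parent j (pvUpIt parent k x) := by
  intro k
  induction k generalizing j with
  | zero => intro x; rfl
  | succ k ih =>
    intro x
    by_cases h : 1 ≤ x ∧ x < (parent.length : Int)
    · have e1 : j + (k+1) = (j + k) + 1 := by omega
      rw [e1, pvUpIt_succ, pvUpIt_succ, if_pos h, if_pos h, ih]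
    · simp [pvUpIt_stuck parent x h]

def pvGrounded (parent : List Int) (x : Int) : Prop := ∃ K, pvUpIt parent K x = 0

theorem pv_cycle_zero (parent : List Int) (x : Int) (hg : pvGrounded parent x)
    (m : Nat) (hm : 1 ≤ m) (hc : pvUpIt parent m x = x) : x = 0 := by
  obtain ⟨K, hK⟩ := hg
  have hpow : ∀ t : Nat, pvUpIt parent (t * m) x = x := by
    intro t
    induction t with
    | zero => rw [Nat.zero_mul]; simp [pvUpIt]
    | succ t iht =>
      have h : (t+1) * m = m + t * m := by ring
      rw [h, pvUpIt_add, iht, hc]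
  have hsplit : K * m = (K * (m - 1)) + K := by
    cases m with
    | zero => omega
    | succ m' => simp [Nat.mul_succ]
  have := hpow K
  rw [hsplit, pvUpIt_add, hK, pvUpIt_zero_left] at this
  exact this.symm

-- two distinct nodes whose up-step lands on a grounded node cannot share a descendant
theorem pv_sib_aux (parent : List Int) (c c1 c2 : Int) (hg : pvGrounded parent c)
    (h1 : pvUpIt parent 1 c1 = c) (h2 : pvUpIt parent 1 c2 = c) (hlb : 1 ≤ c2)
    (d : Nat) (hd : pvUpIt parent d c1 = c2) (hne : c1 ≠ c2) : False := by
  cases d with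
  | zero => exact hne hd
  | succ d' =>
    have hstep : pvUpIt parent (d' + 1) c1 = pvUpIt parent d' c := by
      rw [pvUpIt_add, h1]
    have hdc : pvUpIt parent d' c = c2 := by rw [← hstep, hd]
    have hcyc : pvUpIt parent (1 + d') c = c := by rw [pvUpIt_add, hdc, h2]
    have hc0 : c = 0 := pv_cycle_zero parent c hg (1 + d') (by omega) hcyc
    rw [hc0, pvUpIt_zero_left] at hdc
    omega

theorem pvDesc_anc (parent : List Int) (ns : List Char) :
    ∀ (fuel : Nat) (c x : Int), x ∈ pvDesc ns (pvChildrenDict parent) fuel c →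
      ∃ k, pvUpIt parent k x = c := by
  intro fuel
  induction fuel with
  | zero => intro c x h; simp [pvDesc] at h
  | succ fuel ih =>
    intro c x h
    rw [pvDesc] at h
    rcases hg : PySem.List.pyGet? ns c with _ | ch
    · rw [hg] at h; simp at h
    · rw [hg] at h
      simp only [List.mem_cons, List.mem_flatMap] at h
      rcases h with rfl | ⟨c0, hc0, hx⟩
      · exact ⟨0, rfl⟩
      · obtain ⟨k, hk⟩ := ih c0 x hx
        rw [pv_mem_tree] at hc0
        refine ⟨1 + k, ?_⟩
        rw [pvUpIt_add, hk]
        simp [pvUpIt, hc0.1, hc0.2.1, hc0.2.2]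

theorem pvDesc_range (parent : List Int) (ns : List Char) :
    ∀ (fuel : Nat) (c : Int), 0 ≤ c → c < (parent.length : Int) →
      ∀ x ∈ pvDesc ns (pvChildrenDict parent) fuel c, 0 ≤ x ∧ x < (parent.length : Int) := by
  intro fuel
  induction fuel with
  | zero => intro c _ _ x h; simp [pvDesc] at h
  | succ fuel ih =>
    intro c h0 hn x h
    rw [pvDesc] at h
    rcases hg : PySem.List.pyGet? ns c with _ | ch
    · rw [hg] at h; simp at h
    · rw [hg] at h
      simp only [List.mem_cons, List.mem_flatMap] at h
      rcases h with rfl | ⟨c0, hc0, hx⟩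
      · exact ⟨h0, hn⟩
      · rw [pv_mem_tree] at hc0
        exact ih c0 (by omega) hc0.2.1 x hx

theorem pvDesc_nodup (parent : List Int) (ns : List Char) :
    ∀ (fuel : Nat) (c : Int), pvGrounded parent c →
      (pvDesc ns (pvChildrenDict parent) fuel c).Nodup := by
  intro fuel
  induction fuel with
  | zero => intro c _; simp [pvDesc]
  | succ fuel ih =>
    intro c hg
    rw [pvDesc]
    rcases hget : PySem.List.pyGet? ns c with _ | ch
    · simp
    · -- children facts
      have hch : ∀ c0 ∈ (pvChildrenDict parent).getD c [],
          1 ≤ c0 ∧ c0 < (parent.length : Int) ∧ PySem.List.pyGetD parent c0 0 = c := by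
        intro c0 h; exact (pv_mem_tree parent c c0).mp h
      have hchg : ∀ c0 ∈ (pvChildrenDict parent).getD c [], pvGrounded parent c0 := by
        intro c0 h
        obtain ⟨h1, h2, h3⟩ := hch c0 h
        obtain ⟨K, hK⟩ := hg
        refine ⟨K + 1, ?_⟩
        rw [pvUpIt_add]
        rw [show pvUpIt parent 1 c0 = c from by simp [pvUpIt, h1, h2, h3]]
        exact hK
      have hanc1 : ∀ c0 ∈ (pvChildrenDict parent).getD c [], pvUpIt parent 1 c0 = c := by
        intro c0 h
        obtain ⟨h1, h2, h3⟩ := hch c0 h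
        simp [pvUpIt, h1, h2, h3]
      refine List.Nodup.cons ?_ ?_
      · -- c not in any child subtree
        intro hmem
        rw [List.mem_flatMap] at hmem
        obtain ⟨c0, hc0, hcdesc⟩ := hmem
        obtain ⟨k, hk⟩ := pvDesc_anc parent ns fuel c0 c hcdesc
        have hcyc : pvUpIt parent (1 + k) c = c := by
          rw [pvUpIt_add, hk, hanc1 c0 hc0]
        have hc0eq : c = 0 := pv_cycle_zero parent c hg (1 + k) (by omega) hcyc
        have : c0 = 0 := by
          rw [hc0eq] at hk
          rw [pvUpIt_zero_left] at hk
          exact hk.symm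
        have := (hch c0 hc0).1
        omega
      · -- flatMap nodup
        rw [List.nodup_flatMap]
        constructor
        · intro c0 h; exact ih c0 (hchg c0 h)
        · have hnd := pv_tree_nodup parent c
          refine hnd.imp_of_mem ?_
          intro c1 c2 h1 h2 hne
          intro x hx1 hx2
          obtain ⟨k1, hk1⟩ := pvDesc_anc parent ns fuel c1 x hx1
          obtain ⟨k2, hk2⟩ := pvDesc_anc parent ns fuel c2 x hx2
          rcases le_total k1 k2 with hle | hle
          · have hd : pvUpIt parent (k2 - k1) c1 = c2 := by
              have h : k2 = (k2 - k1) + k1 := by omega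
              rw [h, pvUpIt_add, hk1] at hk2
              exact hk2
            exact pv_sib_aux parent c c1 c2 hg (hanc1 c1 h1) (hanc1 c2 h2)
              (hch c2 h2).1 (k2 - k1) hd hne
          · have hd : pvUpIt parent (k1 - k2) c2 = c1 := by
              have h : k1 = (k1 - k2) + k2 := by omega
              rw [h, pvUpIt_add, hk2] at hk1
              exact hk1
            exact pv_sib_aux parent c c2 c1 hg (hanc1 c2 h2) (hanc1 c1 h1)
              (hch c1 h1).1 (k1 - k2) hd (Ne.symm hne)

-- ===== every rewired parent is discovered earlier =====
def pvKE (parent : List Int) : List Int → List (Int × Option Int) → Prop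
  | _, [] => True
  | seen, p :: rest => pvKey parent p ∈ seen ∧ pvKE parent (seen ++ [p.1]) rest

theorem pvKE_append (parent : List Int) :
    ∀ (l1 l2 : List (Int × Option Int)) (seen : List Int),
      pvKE parent seen (l1 ++ l2) ↔
        (pvKE parent seen l1 ∧ pvKE parent (seen ++ l1.map Prod.fst) l2) := by
  intro l1
  induction l1 with
  | nil => intro l2 seen; simp [pvKE]
  | cons p l1' ih =>
    intro l2 seen
    simp only [List.cons_append, pvKE, List.map_cons, ih, List.append_assoc,
      List.singleton_append]
    tauto

theorem pvKE_both (parent : List Int) (ns : List Char) : ∀ (fuel : Nat),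
    (∀ (node : Int) (caF : Char → Option Int) (seen : List Int),
      (∀ c a, caF c = some a → a ∈ seen) → PySem.List.pyGetD parent node 0 ∈ seen →
      pvKE parent seen (pvVisits ns (pvChildrenDict parent) fuel node caF))
    ∧ (∀ (cs : List Int) (node : Int) (caF' : Char → Option Int) (seen : List Int),
      (∀ c ∈ cs, PySem.List.pyGetD parent c 0 = node) → node ∈ seen →
      (∀ c a, caF' c = some a → a ∈ seen) →
      pvKE parent seen (cs.flatMap (fun c => pvVisits ns (pvChildrenDict parent) fuel c caF'))) := by
  intro fuel
  induction fuel with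
  | zero =>
    constructor
    · intro node caF seen _ _; simp [pvVisits, pvKE]
    · intro cs node caF' seen _ _ _
      have h : cs.flatMap (fun c => pvVisits ns (pvChildrenDict parent) 0 c caF') = [] := by
        simp [pvVisits]
      rw [h]; trivial
  | succ fuel ih =>
    have hv : ∀ (node : Int) (caF : Char → Option Int) (seen : List Int),
        (∀ c a, caF c = some a → a ∈ seen) → PySem.List.pyGetD parent node 0 ∈ seen →
        pvKE parent seen (pvVisits ns (pvChildrenDict parent) (fuel+1) node caF) := by
      intro node caF seen hca hop
      rw [pvVisits]
      cases hg : PySem.List.pyGet? ns node with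
      | none => trivial
      | some ch =>
        refine ⟨?_, ?_⟩
        · cases hc : caF ch with
          | none => simpa [pvKey, hc] using hop
          | some a => simpa [pvKey, hc] using hca ch a hc
        · -- the children couples
          refine ih.2 ((pvChildrenDict parent).getD node []) node _ (seen ++ [node]) ?_ ?_ ?_
          · intro c hc; exact ((pv_mem_tree parent node c).mp hc).2.2
          · simp
          · intro c a hc
            by_cases hcc : c = ch
            · simp [hcc] at hc; simp [hc]
            · simp [hcc] at hc
              exact List.mem_append_left _ (hca c a hc)
    refine ⟨hv, ?_⟩
    intro cs
    induction cs with
    | nil => intro node caF' seen _ _ _; simp [pvKE]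
    | cons c0 cs' ihc =>
      intro node caF' seen hpar hnode hca
      rw [List.flatMap_cons, pvKE_append]
      refine ⟨hv c0 caF' seen hca (by rw [hpar c0 (by simp)]; exact hnode), ?_⟩
      refine ihc node caF' _ (fun c hc => hpar c (by simp [hc])) (List.mem_append_left _ hnode)
        (fun c a hc => List.mem_append_left _ (hca c a hc))

theorem pvKE_getElem (parent : List Int) :
    ∀ (l : List (Int × Option Int)) (seen : List Int), pvKE parent seen l →
      ∀ (i : Nat) (h : i < l.length),
        pvKey parent l[i] ∈ seen ++ (l.take i).map Prod.fst := by
  intro l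
  induction l with
  | nil => intro seen _ i h; simp at h
  | cons p rest ih =>
    intro seen hke i h
    cases i with
    | zero => simpa using hke.1
    | succ j =>
      have := ih _ hke.2 j (by simpa using h)
      simpa [List.append_assoc] using this

theorem pv_idxOf_take_lt : ∀ (l : List Int) (i : Nat) (a : Int), a ∈ l.take i → l.idxOf a < i := by
  intro l
  induction l with
  | nil => intro i a h; simp at h
  | cons b t ih =>
    intro i a h
    cases i with
    | zero => simp at h
    | succ j =>
      rw [List.take_succ_cons] at h
      by_cases hab : a = b
      · subst hab; simp
      · have : a ∈ t.take j := by
          rcases List.mem_cons.mp h with h' | h'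
          · exact absurd h' hab
          · exact h'
        have := ih j a this
        rw [List.idxOf_cons, show (b == a) = false by simp [Ne.symm hab]]
        simp
        omega

-- ===== the assembled phase-1 artefacts =====
def pvVS (parent : List Int) (ns : List Char) : List (Int × Option Int) :=
  pvVisits ns (pvChildrenDict parent) (parent.length+1) 0 (fun _ => none)

def pvS (parent : List Int) (ns : List Char) : List Int := (pvVS parent ns).map Prod.fst

def pvNPD (parent : List Int) (ns : List Char) : PySem.Dict Int (Option Int) :=
  (pvVS parent ns).foldl (fun d p => d.insert p.1 (pvNP parent p)) PySem.Dict.empty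

def pvNT (parent : List Int) (ns : List Char) : PySem.Dict Int (List Int) :=
  (pvVS parent ns).foldl
    (fun d p => d.modify (pvKey parent p) [] (fun l => l ++ [p.1])) PySem.Dict.empty

def pvOK (parent : List Int) (ns : List Char) : Prop :=
  1 ≤ parent.length ∧ parent.length ≤ ns.length ∧
    ¬(0 ≤ PySem.List.pyGetD parent 0 0 ∧ PySem.List.pyGetD parent 0 0 < (parent.length : Int))

theorem pvS_eq_desc (parent : List Int) (ns : List Char) :
    pvS parent ns = pvDesc ns (pvChildrenDict parent) (parent.length+1) 0 :=
  pvVisits_map_fst ns (pvChildrenDict parent) (parent.length+1) 0 _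

theorem pvS_nodup (parent : List Int) (ns : List Char) : (pvS parent ns).Nodup := by
  rw [pvS_eq_desc]
  exact pvDesc_nodup parent ns _ 0 ⟨0, rfl⟩

theorem pvS_range (parent : List Int) (ns : List Char) (hok : pvOK parent ns) :
    ∀ x ∈ pvS parent ns, 0 ≤ x ∧ x < (parent.length : Int) := by
  rw [pvS_eq_desc]
  exact pvDesc_range parent ns _ 0 le_rfl (by exact_mod_cast hok.1)

theorem pvVS_cons (parent : List Int) (ns : List Char) (hok : pvOK parent ns) :
    ∃ rest, pvVS parent ns = (0, none) :: rest ∧ pvKE parent [0] rest := by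
  have hns : 0 < ns.length := by have := hok.1; have := hok.2.1; omega
  have hg : PySem.List.pyGet? ns 0 = some ns[0] := by
    rw [PySem.List.pyGet?_zero]
    exact List.getElem?_eq_getElem hns
  refine ⟨((pvChildrenDict parent).getD 0 []).flatMap
      (fun c => pvVisits ns (pvChildrenDict parent) parent.length c
        (fun c' => if c' = ns[0] then some 0 else (fun _ => (none : Option Int)) c')), ?_, ?_⟩
  · show pvVS parent ns = ((0 : Int), (fun _ => (none : Option Int)) ns[0]) :: _
    rw [pvVS, pvVisits, hg]
  · refine (pvKE_both parent ns parent.length).2 _ 0 _ [0] ?_ (by simp) ?_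
    · intro c hc; exact ((pv_mem_tree parent 0 c).mp hc).2.2
    · intro c a hc
      by_cases hcc : c = ns[0] <;> simp [hcc] at hc <;> simp [hc]

theorem pvS_hd (parent : List Int) (ns : List Char) (hok : pvOK parent ns) :
    ∃ t, pvS parent ns = 0 :: t := by
  obtain ⟨rest, hvs, _⟩ := pvVS_cons parent ns hok
  exact ⟨rest.map Prod.fst, by rw [pvS, hvs]; simp⟩

theorem pv_key_earlier (parent : List Int) (ns : List Char) (hok : pvOK parent ns) :
    ∀ (i : Nat) (h : i < (pvVS parent ns).length), 1 ≤ i →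
      pvKey parent ((pvVS parent ns)[i]) ∈ (pvS parent ns).take i := by
  intro i h h1
  obtain ⟨rest, hvs, hke⟩ := pvVS_cons parent ns hok
  rcases i with _ | j
  · omega
  · have hlen : j < rest.length := by rw [hvs] at h; simpa using h
    have := pvKE_getElem parent rest [0] hke j hlen
    have hget : (pvVS parent ns)[j+1] = rest[j] := by
      simp [hvs]
    rw [hget]
    rw [pvS, hvs]
    simpa using this

-- ===== lookups in the rewired-parent dict =====
theorem pv_get?_foldl_insert_not_mem (parent : List Int) :
    ∀ (l : List (Int × Option Int)) (d : PySem.Dict Int (Option Int)) (x : Int),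
      x ∉ l.map Prod.fst →
      (l.foldl (fun d p => d.insert p.1 (pvNP parent p)) d).get? x = d.get? x := by
  intro l
  induction l with
  | nil => intro d x _; rfl
  | cons q rest ih =>
    intro d x hx
    simp only [List.map_cons, List.mem_cons, not_or] at hx
    rw [List.foldl_cons, ih _ x (by exact hx.2), PySem.Dict.get?_insert_of_ne _ _ hx.1]

theorem pv_get?_foldl_insert_mem (parent : List Int) :
    ∀ (l : List (Int × Option Int)) (d : PySem.Dict Int (Option Int)) (p : Int × Option Int),
      (l.map Prod.fst).Nodup → p ∈ l →
      (l.foldl (fun d p => d.insert p.1 (pvNP parent p)) d).get? p.1 = some (pvNP parent p) := by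
  intro l
  induction l with
  | nil => intro d p _ hp; simp at hp
  | cons q rest ih =>
    intro d p hnd hp
    rw [List.map_cons, List.nodup_cons] at hnd
    rcases List.mem_cons.mp hp with rfl | hp'
    · rw [List.foldl_cons, pv_get?_foldl_insert_not_mem parent rest _ p.1 hnd.1,
        PySem.Dict.get?_insert_self]
    · exact ih _ p hnd.2 hp'

theorem pv_npd_get (parent : List Int) (ns : List Char) (p : Int × Option Int)
    (hp : p ∈ pvVS parent ns) : (pvNPD parent ns).getD p.1 none = pvNP parent p := by
  have h := pv_get?_foldl_insert_mem parent (pvVS parent ns) PySem.Dict.empty p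
    (pvS_nodup parent ns) hp
  show ((pvVS parent ns).foldl (fun d p => d.insert p.1 (pvNP parent p))
      PySem.Dict.empty).getD p.1 none = pvNP parent p
  rw [PySem.Dict.getD, h]
  rfl

theorem pv_npd_not_mem (parent : List Int) (ns : List Char) (x : Int)
    (hx : x ∉ pvS parent ns) : (pvNPD parent ns).getD x none = none := by
  show ((pvVS parent ns).foldl (fun d p => d.insert p.1 (pvNP parent p))
      PySem.Dict.empty).getD x none = none
  rw [PySem.Dict.getD, pv_get?_foldl_insert_not_mem parent _ _ x hx, PySem.Dict.get?_empty]
  rfl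

theorem pvNP_eq_key (parent : List Int) (p : Int × Option Int) (h : p.1 ≠ 0) :
    pvNP parent p = some (pvKey parent p) := by
  cases hp : p.2 <;> simp [pvNP, pvKey, hp, h]

theorem pv_pair_zero (parent : List Int) (ns : List Char) (hok : pvOK parent ns)
    (q : Int × Option Int) (hq : q ∈ pvVS parent ns) (hq0 : q.1 = 0) : q = (0, none) := by
  obtain ⟨rest, hvs, _⟩ := pvVS_cons parent ns hok
  rw [hvs] at hq
  rcases List.mem_cons.mp hq with rfl | hq'
  · rfl
  · exfalso
    have hnd := pvS_nodup parent ns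
    rw [pvS, hvs, List.map_cons, List.nodup_cons] at hnd
    have hm : q.1 ∈ rest.map Prod.fst := List.mem_map_of_mem hq'
    rw [hq0] at hm
    exact hnd.1 hm

theorem pv_npd_root (parent : List Int) (ns : List Char) (hok : pvOK parent ns) :
    (pvNPD parent ns).getD 0 none = none := by
  obtain ⟨rest, hvs, _⟩ := pvVS_cons parent ns hok
  have h0 : ((0 : Int), (none : Option Int)) ∈ pvVS parent ns := by rw [hvs]; simp
  have := pv_npd_get parent ns (0, none) h0
  simpa [pvNP] using this

theorem pv_npd_step (parent : List Int) (ns : List Char) (hok : pvOK parent ns)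
    (x : Int) (hx : x ∈ pvS parent ns) (hx0 : x ≠ 0) :
    ∃ p', (pvNPD parent ns).getD x none = some p' ∧ p' ∈ pvS parent ns ∧
      (pvS parent ns).idxOf p' < (pvS parent ns).idxOf x := by
  obtain ⟨i, hi, hxi⟩ := List.getElem_of_mem hx
  have hiv : i < (pvVS parent ns).length := by simpa [pvS] using hi
  have hfst : ((pvVS parent ns)[i]).1 = x := by
    have : (pvS parent ns)[i] = ((pvVS parent ns)[i]).1 := by simp [pvS]
    rw [← hxi, this]
  have hi1 : 1 ≤ i := by
    rcases Nat.eq_zero_or_pos i with rfl | h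
    · exfalso
      apply hx0
      obtain ⟨rest, hvs, _⟩ := pvVS_cons parent ns hok
      simp only [hvs, List.getElem_cons_zero] at hfst
      exact hfst.symm
    · exact h
  have hkey := pv_key_earlier parent ns hok i hiv hi1
  have hmem : (pvVS parent ns)[i] ∈ pvVS parent ns := List.getElem_mem _
  have hnp := pv_npd_get parent ns _ hmem
  rw [hfst] at hnp
  rw [pvNP_eq_key parent _ (by rw [hfst]; exact hx0)] at hnp
  refine ⟨pvKey parent ((pvVS parent ns)[i]), hnp, List.mem_of_mem_take hkey, ?_⟩
  have h1 := pv_idxOf_take_lt (pvS parent ns) i _ hkey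
  have h2 : (pvS parent ns).idxOf x = i := by
    rw [← hxi]
    exact (pvS_nodup parent ns).idxOf_getElem i hi
  omega

-- ===== the rewired adjacency dict =====
theorem pvNT_getD (parent : List Int) (ns : List Char) (k : Int) :
    (pvNT parent ns).getD k [] =
      ((pvVS parent ns).filter (fun p => pvKey parent p == k)).map Prod.fst := by
  unfold pvNT
  have h := PySem.Dict.getD_foldl_modify_append
    ((pvVS parent ns).map (fun p => (pvKey parent p, p.1)))
    (PySem.Dict.empty : PySem.Dict Int (List Int)) k
  rw [List.foldl_map] at h
  rw [h]
  simp [PySem.Dict.getD_empty, List.filter_map, Function.comp_def]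

theorem pvNT_nodup (parent : List Int) (ns : List Char) (k : Int) :
    ((pvNT parent ns).getD k []).Nodup := by
  rw [pvNT_getD]
  exact (pvS_nodup parent ns).sublist (List.Sublist.map Prod.fst List.filter_sublist)

theorem pv_mem_nt (parent : List Int) (ns : List Char) (hok : pvOK parent ns)
    (x : Int) (hx : x ∈ pvS parent ns) (c : Int) :
    c ∈ (pvNT parent ns).getD x [] ↔
      (c ∈ pvS parent ns ∧ (pvNPD parent ns).getD c none = some x) := by
  rw [pvNT_getD]
  constructor
  · intro h
    obtain ⟨p, hp, hpc⟩ := List.mem_map.mp h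
    have hpf := List.mem_filter.mp hp
    have hkey : pvKey parent p = x := by simpa using hpf.2
    have hc0 : p.1 ≠ 0 := by
      intro h0
      have := pv_pair_zero parent ns hok p hpf.1 h0
      rw [this] at hkey
      have hrange := pvS_range parent ns hok x hx
      simp [pvKey] at hkey
      rw [← hkey] at hrange
      exact hok.2.2 hrange
    refine ⟨hpc ▸ List.mem_map_of_mem hpf.1, ?_⟩
    rw [← hpc, pv_npd_get parent ns p hpf.1, pvNP_eq_key parent p hc0, hkey]
  · rintro ⟨hcS, hnp⟩
    obtain ⟨q, hq, hqc⟩ := List.mem_map.mp hcS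
    have hq' := pv_npd_get parent ns q hq
    have hq0 : q.1 ≠ 0 := by
      intro h0
      rw [← hqc, h0, pv_npd_root parent ns hok] at hnp
      simp at hnp
    rw [← hqc, hq', pvNP_eq_key parent q hq0] at hnp
    have hkey : pvKey parent q = x := by simpa using hnp
    refine List.mem_map.mpr ⟨q, List.mem_filter.mpr ⟨hq, by simp [hkey]⟩, hqc⟩

-- ===== |S| is at most n =====
theorem pvS_len_le (parent : List Int) (ns : List Char) (hok : pvOK parent ns) :
    (pvS parent ns).length ≤ parent.length := by
  classical
  have hnd := pvS_nodup parent ns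
  have hcard : (pvS parent ns).toFinset.card = (pvS parent ns).length :=
    List.toFinset_card_of_nodup hnd
  have hsub : (pvS parent ns).toFinset ⊆ Finset.Icc (0 : Int) ((parent.length : Int) - 1) := by
    intro x hxm
    have hx := List.mem_toFinset.mp hxm
    have := pvS_range parent ns hok x hx
    rw [Finset.mem_Icc]
    omega
  have := Finset.card_le_card hsub
  rw [hcard] at this
  rw [Int.card_Icc] at this
  omega

-- ===== rewired ancestor chains =====
def pvAncs (npd : PySem.Dict Int (Option Int)) : Nat → Int → List Int
  | 0, _ => []
  | fuel+1, v =>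
    v :: (match npd.getD v none with
          | some p => pvAncs npd fuel p
          | none => [])

theorem pvAncs_succ (npd : PySem.Dict Int (Option Int)) (fuel : Nat) (v : Int) :
    pvAncs npd (fuel+1) v =
      v :: (match npd.getD v none with
            | some p => pvAncs npd fuel p
            | none => []) := rfl

theorem pvAncs_stable (parent : List Int) (ns : List Char) (hok : pvOK parent ns) :
    ∀ (k : Nat) (x : Int), x ∈ pvS parent ns → (pvS parent ns).idxOf x < k →
      ∀ (f g : Nat), (pvS parent ns).idxOf x < f → (pvS parent ns).idxOf x < g →
        pvAncs (pvNPD parent ns) f x = pvAncs (pvNPD parent ns) g x := by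
  intro k
  induction k with
  | zero => intro x _ h; omega
  | succ k ih =>
    intro x hx hk f g hf hg
    obtain ⟨f', rfl⟩ : ∃ f', f = f'+1 := ⟨f-1, by omega⟩
    obtain ⟨g', rfl⟩ : ∃ g', g = g'+1 := ⟨g-1, by omega⟩
    by_cases hx0 : x = 0
    · subst hx0
      rw [pvAncs_succ, pvAncs_succ, pv_npd_root parent ns hok]
    · obtain ⟨p, hp, hpS, hplt⟩ := pv_npd_step parent ns hok x hx hx0
      rw [pvAncs_succ, pvAncs_succ, hp]
      show x :: pvAncs (pvNPD parent ns) f' p = x :: pvAncs (pvNPD parent ns) g' p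
      rw [ih p hpS (by omega) f' g' (by omega) (by omega)]

def pvChain (parent : List Int) (ns : List Char) (x : Int) : List Int :=
  pvAncs (pvNPD parent ns) ((pvS parent ns).length) x

theorem pvChain_root (parent : List Int) (ns : List Char) (hok : pvOK parent ns) :
    pvChain parent ns 0 = [0] := by
  obtain ⟨t, ht⟩ := pvS_hd parent ns hok
  have h0 : (0 : Int) ∈ pvS parent ns := by rw [ht]; simp
  have hlt := List.idxOf_lt_length_of_mem h0
  obtain ⟨L', hL⟩ : ∃ L', (pvS parent ns).length = L'+1 :=
    ⟨(pvS parent ns).length - 1, by omega⟩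
  unfold pvChain
  rw [hL, pvAncs_succ, pv_npd_root parent ns hok]

theorem pvChain_some (parent : List Int) (ns : List Char) (hok : pvOK parent ns)
    (x : Int) (hx : x ∈ pvS parent ns) (p : Int)
    (hp : (pvNPD parent ns).getD x none = some p) :
    pvChain parent ns x = x :: pvChain parent ns p := by
  have hx0 : x ≠ 0 := by
    intro h0; rw [h0, pv_npd_root parent ns hok] at hp; simp at hp
  obtain ⟨p', hp', hpS, hplt⟩ := pv_npd_step parent ns hok x hx hx0
  have hpp : p' = p := by rw [hp'] at hp; simpa using hp
  subst hpp
  have hlt := List.idxOf_lt_length_of_mem hx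
  have hplt' := List.idxOf_lt_length_of_mem hpS
  obtain ⟨L', hL⟩ : ∃ L', (pvS parent ns).length = L'+1 :=
    ⟨(pvS parent ns).length - 1, by omega⟩
  unfold pvChain
  rw [hL, pvAncs_succ, hp]
  show x :: pvAncs (pvNPD parent ns) L' p' = x :: pvAncs (pvNPD parent ns) (L'+1) p'
  rw [pvAncs_stable parent ns hok ((pvS parent ns).idxOf p' + 1) p' hpS (by omega)
    L' (L'+1) (by omega) (by omega)]

-- case split helper: for x ∈ S either x = 0 with chain [0], or an earlier parent exists
theorem pvChain_cases (parent : List Int) (ns : List Char) (hok : pvOK parent ns)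
    (x : Int) (hx : x ∈ pvS parent ns) :
    (x = 0 ∧ pvChain parent ns x = [0]) ∨
      (∃ p, (pvNPD parent ns).getD x none = some p ∧ p ∈ pvS parent ns ∧
        (pvS parent ns).idxOf p < (pvS parent ns).idxOf x ∧
        pvChain parent ns x = x :: pvChain parent ns p) := by
  by_cases hx0 : x = 0
  · subst hx0; exact Or.inl ⟨rfl, pvChain_root parent ns hok⟩
  · obtain ⟨p, hp, hpS, hplt⟩ := pv_npd_step parent ns hok x hx hx0
    exact Or.inr ⟨p, hp, hpS, hplt, pvChain_some parent ns hok x hx p hp⟩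

theorem pvChain_self (parent : List Int) (ns : List Char) (hok : pvOK parent ns)
    (x : Int) (hx : x ∈ pvS parent ns) : x ∈ pvChain parent ns x := by
  rcases pvChain_cases parent ns hok x hx with ⟨hx0, hc⟩ | ⟨p, _, _, _, hc⟩
  · subst hx0; rw [hc]; simp
  · rw [hc]; simp

theorem pvChain_subset (parent : List Int) (ns : List Char) (hok : pvOK parent ns) :
    ∀ (k : Nat) (x : Int), x ∈ pvS parent ns → (pvS parent ns).idxOf x < k →
      ∀ a ∈ pvChain parent ns x, a ∈ pvS parent ns ∧
        (pvS parent ns).idxOf a ≤ (pvS parent ns).idxOf x := by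
  intro k
  induction k with
  | zero => intro x _ h; omega
  | succ k ih =>
    intro x hx hk a ha
    rcases pvChain_cases parent ns hok x hx with ⟨hx0, hc⟩ | ⟨p, hp, hpS, hplt, hc⟩
    · rw [hc] at ha
      simp at ha
      subst ha
      rw [hx0] at hx ⊢
      exact ⟨hx, le_rfl⟩
    · rw [hc] at ha
      rcases List.mem_cons.mp ha with rfl | ha'
      · exact ⟨hx, le_rfl⟩
      · have := ih p hpS (by omega) a ha'
        exact ⟨this.1, by omega⟩

theorem pvChain_nodup (parent : List Int) (ns : List Char) (hok : pvOK parent ns) :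
    ∀ (k : Nat) (x : Int), x ∈ pvS parent ns → (pvS parent ns).idxOf x < k →
      (pvChain parent ns x).Nodup := by
  intro k
  induction k with
  | zero => intro x _ h; omega
  | succ k ih =>
    intro x hx hk
    rcases pvChain_cases parent ns hok x hx with ⟨_, hc⟩ | ⟨p, hp, hpS, hplt, hc⟩
    · rw [hc]; simp
    · rw [hc]
      refine List.Nodup.cons ?_ (ih p hpS (by omega))
      intro hmem
      have := pvChain_subset parent ns hok ((pvS parent ns).idxOf p + 1) p hpS (by omega) x hmem
      omega

theorem pvChain_zero (parent : List Int) (ns : List Char) (hok : pvOK parent ns) :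
    ∀ (k : Nat) (x : Int), x ∈ pvS parent ns → (pvS parent ns).idxOf x < k →
      (0 : Int) ∈ pvChain parent ns x := by
  intro k
  induction k with
  | zero => intro x _ h; omega
  | succ k ih =>
    intro x hx hk
    rcases pvChain_cases parent ns hok x hx with ⟨hx0, hc⟩ | ⟨p, hp, hpS, hplt, hc⟩
    · rw [hc]; simp
    · rw [hc]
      exact List.mem_cons_of_mem _ (ih p hpS (by omega))

theorem pvChain_trans (parent : List Int) (ns : List Char) (hok : pvOK parent ns) :
    ∀ (k : Nat) (x : Int), x ∈ pvS parent ns → (pvS parent ns).idxOf x < k →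
      ∀ a b, b ∈ pvChain parent ns x → a ∈ pvChain parent ns b → a ∈ pvChain parent ns x := by
  intro k
  induction k with
  | zero => intro x _ h; omega
  | succ k ih =>
    intro x hx hk a b hb ha
    rcases pvChain_cases parent ns hok x hx with ⟨hx0, hc⟩ | ⟨p, hp, hpS, hplt, hc⟩
    · rw [hc] at hb
      simp at hb
      subst hb
      rw [hx0]
      exact ha
    · rw [hc] at hb ⊢
      rcases List.mem_cons.mp hb with rfl | hb'
      · rw [hc] at ha
        exact ha
      · exact List.mem_cons_of_mem _ (ih p hpS (by omega) a b hb' ha)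

theorem pvChain_comp (parent : List Int) (ns : List Char) (hok : pvOK parent ns) :
    ∀ (k : Nat) (x : Int), x ∈ pvS parent ns → (pvS parent ns).idxOf x < k →
      ∀ a b, a ∈ pvChain parent ns x → b ∈ pvChain parent ns x →
        a ∈ pvChain parent ns b ∨ b ∈ pvChain parent ns a := by
  intro k
  induction k with
  | zero => intro x _ h; omega
  | succ k ih =>
    intro x hx hk a b ha hb
    rcases pvChain_cases parent ns hok x hx with ⟨hx0, hc⟩ | ⟨p, hp, hpS, hplt, hc⟩
    · rw [hc] at ha hb
      simp at ha hb
      subst ha; subst hb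
      subst hx0
      left; exact pvChain_self parent ns hok 0 hx
    · rw [hc] at ha hb
      rcases List.mem_cons.mp ha with rfl | ha' <;> rcases List.mem_cons.mp hb with hb' | hb'
      · left; rw [hb']; exact pvChain_self parent ns hok _ hx
      · right
        rw [pvChain_some parent ns hok a hx p hp]
        exact List.mem_cons_of_mem _ hb'
      · left
        rw [hb', pvChain_some parent ns hok x hx p hp]
        exact List.mem_cons_of_mem _ ha'
      · exact ih p hpS (by omega) a b ha' hb'

theorem pvChain_pred (parent : List Int) (ns : List Char) (hok : pvOK parent ns) :
    ∀ (k : Nat) (j : Int), j ∈ pvS parent ns → (pvS parent ns).idxOf j < k →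
      ∀ x, x ∈ pvChain parent ns j → x ≠ j →
        ∃ c, c ∈ pvChain parent ns j ∧ (pvNPD parent ns).getD c none = some x := by
  intro k
  induction k with
  | zero => intro j _ h; omega
  | succ k ih =>
    intro j hj hk x hx hne
    rcases pvChain_cases parent ns hok j hj with ⟨hj0, hc⟩ | ⟨p, hp, hpS, hplt, hc⟩
    · rw [hc] at hx
      simp at hx
      rw [hj0] at hne
      exact absurd hx hne
    · rw [hc] at hx
      rcases List.mem_cons.mp hx with rfl | hx'
      · exact absurd rfl hne
      · by_cases hxp : x = p
        · refine ⟨j, pvChain_self parent ns hok j hj, ?_⟩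
          rw [hp, hxp]
        · obtain ⟨c, hcm, hcnp⟩ := ih p hpS (by omega) x hx' hxp
          exact ⟨c, hc ▸ List.mem_cons_of_mem _ hcm, hcnp⟩

theorem pvChain_pred_unique (parent : List Int) (ns : List Char) (hok : pvOK parent ns)
    (j : Int) (hj : j ∈ pvS parent ns) (x c1 c2 : Int)
    (hc1 : c1 ∈ pvChain parent ns j) (hc2 : c2 ∈ pvChain parent ns j)
    (h1 : (pvNPD parent ns).getD c1 none = some x)
    (h2 : (pvNPD parent ns).getD c2 none = some x) : c1 = c2 := by
  have hc1S := (pvChain_subset parent ns hok _ j hj (Nat.lt_succ_self _) c1 hc1).1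
  have hc2S := (pvChain_subset parent ns hok _ j hj (Nat.lt_succ_self _) c2 hc2).1
  have hx1 : x ∈ pvS parent ns ∧ (pvS parent ns).idxOf x < (pvS parent ns).idxOf c1 := by
    have hne : c1 ≠ 0 := by
      intro h0; rw [h0, pv_npd_root parent ns hok] at h1; simp at h1
    obtain ⟨p, hp, hpS, hplt⟩ := pv_npd_step parent ns hok c1 hc1S hne
    rw [hp] at h1
    have hpx : p = x := by simpa using h1
    subst hpx
    exact ⟨hpS, hplt⟩
  have hx2 : (pvS parent ns).idxOf x < (pvS parent ns).idxOf c2 := by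
    have hne : c2 ≠ 0 := by
      intro h0; rw [h0, pv_npd_root parent ns hok] at h2; simp at h2
    obtain ⟨p, hp, hpS, hplt⟩ := pv_npd_step parent ns hok c2 hc2S hne
    rw [hp] at h2
    have hpx : p = x := by simpa using h2
    subst hpx
    exact hplt
  by_contra hne
  rcases pvChain_comp parent ns hok _ j hj (Nat.lt_succ_self _) c1 c2 hc1 hc2 with hin | hin
  · rw [pvChain_some parent ns hok c2 hc2S x h2] at hin
    rcases List.mem_cons.mp hin with h | h
    · exact hne h
    · have := (pvChain_subset parent ns hok _ x hx1.1 (Nat.lt_succ_self _) c1 h).2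
      omega
  · rw [pvChain_some parent ns hok c1 hc1S x h1] at hin
    rcases List.mem_cons.mp hin with h | h
    · exact hne h.symm
    · have := (pvChain_subset parent ns hok _ x hx1.1 (Nat.lt_succ_self _) c2 h).2
      omega

-- ===== counting descendants along rewired chains =====
def pvCnt (parent : List Int) (ns : List Char) (a : Int) : Nat :=
  (pvS parent ns).countP (fun x => decide (a ∈ pvChain parent ns x))

theorem pv_countP_or_disjoint : ∀ (S : List Int) (p q : Int → Bool),
    (∀ x ∈ S, ¬(p x = true ∧ q x = true)) →
    S.countP (fun x => p x || q x) = S.countP p + S.countP q := by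
  intro S
  induction S with
  | nil => intro p q _; simp
  | cons b t ih =>
    intro p q h
    simp only [List.countP_cons]
    rw [ih p q (fun x hx => h x (List.mem_cons_of_mem _ hx))]
    have hb := h b (by simp)
    cases hp : p b <;> cases hq : q b <;> simp_all <;> omega

theorem pv_countP_any : ∀ (cs : List Int) (S : List Int) (pr : Int → Int → Bool),
    cs.Nodup →
    (∀ x ∈ S, ∀ c1 ∈ cs, ∀ c2 ∈ cs, pr c1 x = true → pr c2 x = true → c1 = c2) →
    S.countP (fun x => cs.any (fun c => pr c x)) = (cs.map (fun c => S.countP (pr c))).sum := by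
  intro cs
  induction cs with
  | nil => intro S pr _ _; simp
  | cons c0 cs' ih =>
    intro S pr hnd huniq
    rw [List.nodup_cons] at hnd
    have hstep : S.countP (fun x => (c0 :: cs').any (fun c => pr c x))
        = S.countP (fun x => pr c0 x || cs'.any (fun c => pr c x)) := by
      apply List.countP_congr
      intro x _
      simp [List.any_cons]
    rw [hstep, pv_countP_or_disjoint S _ _ ?_, List.map_cons, List.sum_cons,
      ih S pr hnd.2 (fun x hx c1 h1 c2 h2 => huniq x hx c1 (by simp [h1]) c2 (by simp [h2]))]
    intro x hx ⟨h1, h2⟩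
    rw [List.any_eq_true] at h2
    obtain ⟨c, hc, hpc⟩ := h2
    exact hnd.1 (huniq x hx c0 (by simp) c (by simp [hc]) h1 hpc ▸ hc)

theorem pv_countP_eq_self (a : Int) :
    ∀ (S : List Int), S.Nodup → a ∈ S → S.countP (fun x => decide (x = a)) = 1 := by
  intro S
  induction S with
  | nil => intro _ h; simp at h
  | cons b t ih =>
    intro hnd hmem
    rw [List.nodup_cons] at hnd
    rcases List.mem_cons.mp hmem with rfl | hmem'
    · simp only [List.countP_cons, decide_eq_true_eq]
      rw [List.countP_eq_zero.mpr]
      · simp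
      · intro x hx
        simp only [decide_eq_true_eq]
        intro hxa
        exact hnd.1 (hxa ▸ hx)
    · have hba : ¬(b = a) := by
        intro h; exact hnd.1 (h ▸ hmem')
      simp only [List.countP_cons, decide_eq_true_eq, hba]
      rw [ih hnd.2 hmem']
      simp

theorem pvChain_via_children (parent : List Int) (ns : List Char) (hok : pvOK parent ns)
    (a : Int) (ha : a ∈ pvS parent ns) (j : Int) (hj : j ∈ pvS parent ns) (hne : a ≠ j) :
    (a ∈ pvChain parent ns j ↔
      ∃ c ∈ (pvNT parent ns).getD a [], c ∈ pvChain parent ns j) := by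
  constructor
  · intro h
    obtain ⟨c, hcm, hcnp⟩ := pvChain_pred parent ns hok _ j hj (Nat.lt_succ_self _) a h hne
    have hcS := (pvChain_subset parent ns hok _ j hj (Nat.lt_succ_self _) c hcm).1
    exact ⟨c, (pv_mem_nt parent ns hok a ha c).mpr ⟨hcS, hcnp⟩, hcm⟩
  · rintro ⟨c, hcnt, hcm⟩
    obtain ⟨hcS, hcnp⟩ := (pv_mem_nt parent ns hok a ha c).mp hcnt
    have hac : a ∈ pvChain parent ns c := by
      rw [pvChain_some parent ns hok c hcS a hcnp]
      exact List.mem_cons_of_mem _ (pvChain_self parent ns hok a ha)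
    exact pvChain_trans parent ns hok _ j hj (Nat.lt_succ_self _) a c hcm hac

theorem pvCnt_node (parent : List Int) (ns : List Char) (hok : pvOK parent ns)
    (a : Int) (ha : a ∈ pvS parent ns) :
    pvCnt parent ns a = 1 + (((pvNT parent ns).getD a []).map (pvCnt parent ns)).sum := by
  have hpt : ∀ x ∈ pvS parent ns,
      decide (a ∈ pvChain parent ns x) = true ↔
      (decide (x = a) || ((pvNT parent ns).getD a []).any
        (fun c => decide (c ∈ pvChain parent ns x))) = true := by
    intro x hxS
    by_cases hxa : x = a
    · subst hxa
      simp [pvChain_self parent ns hok x hxS]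
    · simp only [Bool.or_eq_true, decide_eq_true_eq, List.any_eq_true]
      rw [pvChain_via_children parent ns hok a ha x hxS (fun h => hxa h.symm)]
      constructor
      · rintro ⟨c, h1, h2⟩; exact Or.inr ⟨c, h1, h2⟩
      · rintro (h | ⟨c, h1, h2⟩)
        · exact absurd h hxa
        · exact ⟨c, h1, h2⟩
  unfold pvCnt
  rw [List.countP_congr hpt, pv_countP_or_disjoint _ _ _ ?disj]
  case disj =>
    rintro x hx ⟨h1, h2⟩
    simp only [decide_eq_true_eq] at h1
    subst h1
    rw [List.any_eq_true] at h2
    obtain ⟨c, hcnt, hcm⟩ := h2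
    simp only [decide_eq_true_eq] at hcm
    obtain ⟨hcS, hcnp⟩ := (pv_mem_nt parent ns hok x ha c).mp hcnt
    have hle := (pvChain_subset parent ns hok _ x hx (Nat.lt_succ_self _) c hcm).2
    have hne : c ≠ 0 := by
      intro h0; rw [h0, pv_npd_root parent ns hok] at hcnp; simp at hcnp
    obtain ⟨p, hp, hpS, hplt⟩ := pv_npd_step parent ns hok c hcS hne
    rw [hp] at hcnp
    have hpx : p = x := by simpa using hcnp
    subst hpx
    omega
  rw [pv_countP_eq_self a _ (pvS_nodup parent ns) ha]
  congr 1
  rw [pv_countP_any _ _ _ (pvNT_nodup parent ns a) ?uniq]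
  case uniq =>
    intro x hx c1 h1 c2 h2 hp1 hp2
    simp only [decide_eq_true_eq] at hp1 hp2
    exact pvChain_pred_unique parent ns hok x hx a c1 c2 hp1 hp2
      ((pv_mem_nt parent ns hok a ha c1).mp h1).2 ((pv_mem_nt parent ns hok a ha c2).mp h2).2

-- ===== element updates =====
theorem pv_getD_setD (sz : List Int) (v w : Int) (hv : 0 ≤ v) (j : Nat) (hj : j < sz.length) :
    PySem.List.pyGetD (PySem.List.pySetD sz v w) (j : Int) 0 =
      if (j : Int) = v then w else PySem.List.pyGetD sz (j : Int) 0 := by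
  by_cases hvr : v < (sz.length : Int)
  · have hvn : v = ((v.toNat : Nat) : Int) := by omega
    rw [hvn, PySem.List.pySetD_natCast, ← hvn]
    have := PySem.List.pyGetD_pySetD_natCast sz v.toNat j w 0 (by omega)
    rw [PySem.List.pySetD_natCast] at this
    rw [this]
    have : ((j : Int) = v) ↔ (j = v.toNat) := by omega
    simp only [this]
  · have hnone : PySem.List.pySet? sz v w = none := by
      rw [PySem.List.pySet?_eq_none_iff]
      intro hir
      rcases hir with ⟨h1, h2⟩
      omega
    have hsame : PySem.List.pySetD sz v w = sz := by
      unfold PySem.List.pySetD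
      rw [hnone]
      rfl
    rw [hsame, if_neg (by omega)]

theorem pvB_chase_len (npd : PySem.Dict Int (Option Int)) :
    ∀ (fuel : Nat) (v : Int) (sz : List Int), (pvB_chase npd fuel v sz).length = sz.length := by
  intro fuel
  induction fuel with
  | zero => intro v sz; rfl
  | succ fuel ih =>
    intro v sz
    rw [pvB_chase]
    cases npd.getD v none with
    | some p => rw [ih]; exact PySem.List.length_pySetD _ _ _
    | none => exact PySem.List.length_pySetD _ _ _

theorem pvB_chase_getD (npd : PySem.Dict Int (Option Int))
    (hnn : ∀ x p, npd.getD x none = some p → 0 ≤ p) :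
    ∀ (fuel : Nat) (v : Int), 0 ≤ v → ∀ (sz : List Int) (j : Nat), j < sz.length →
      PySem.List.pyGetD (pvB_chase npd fuel v sz) (j : Int) 0 =
        PySem.List.pyGetD sz (j : Int) 0 + ((pvAncs npd fuel v).count (j : Int) : Int) := by
  intro fuel
  induction fuel with
  | zero => intro v _ sz j _; simp [pvB_chase, pvAncs]
  | succ fuel ih =>
    intro v hv sz j hj
    rw [pvB_chase, pvAncs_succ]
    cases hnp : npd.getD v none with
    | some p =>
      rw [ih p (hnn v p hnp) _ j (by rw [PySem.List.length_pySetD]; exact hj)]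
      rw [pv_getD_setD sz v _ hv j hj]
      rw [List.count_cons]
      by_cases hjv : (j : Int) = v <;> simp [hjv] <;> push_cast <;> omega
    | none =>
      rw [pv_getD_setD sz v _ hv j hj]
      rw [List.count_cons]
      by_cases hjv : (j : Int) = v <;> simp [hjv] <;> omega

-- ===== A's size DFS computes the chain counts =====
theorem pvA_dfsSize_succ (nt : PySem.Dict Int (List Int)) (f : Nat) (node : Int) (sz : List Int) :
    pvA_dfsSize nt (f+1) node sz =
      ((PySem.List.pySetD ((nt.getD node []).foldl
          (fun (acc : List Int × Int) child =>
            let r := pvA_dfsSize nt f child acc.1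
            (r.1, acc.2 + r.2)) (sz, 1)).1 node
          ((nt.getD node []).foldl
          (fun (acc : List Int × Int) child =>
            let r := pvA_dfsSize nt f child acc.1
            (r.1, acc.2 + r.2)) (sz, 1)).2),
        ((nt.getD node []).foldl
          (fun (acc : List Int × Int) child =>
            let r := pvA_dfsSize nt f child acc.1
            (r.1, acc.2 + r.2)) (sz, 1)).2) := rfl

theorem pvA_dfsSize_spec (parent : List Int) (ns : List Char) (hok : pvOK parent ns) :
    ∀ (k : Nat) (x : Int), x ∈ pvS parent ns →
      (pvS parent ns).length - (pvS parent ns).idxOf x ≤ k →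
      ∀ (fuel : Nat), (pvS parent ns).length - (pvS parent ns).idxOf x ≤ fuel →
      ∀ (sz : List Int), sz.length = parent.length →
        (pvA_dfsSize (pvNT parent ns) fuel x sz).2 = (pvCnt parent ns x : Int) ∧
        (pvA_dfsSize (pvNT parent ns) fuel x sz).1.length = sz.length ∧
        (∀ (j : Nat), j < sz.length →
          PySem.List.pyGetD ((pvA_dfsSize (pvNT parent ns) fuel x sz).1) (j : Int) 0 =
            if ((j : Int) ∈ pvS parent ns ∧ x ∈ pvChain parent ns (j : Int))
              then (pvCnt parent ns (j : Int) : Int)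
              else PySem.List.pyGetD sz (j : Int) 0) := by
  intro k
  induction k with
  | zero =>
    intro x hx hk
    have := List.idxOf_lt_length_of_mem hx
    omega
  | succ k ih =>
    intro x hx hk fuel hfuel sz hsz
    have hxlt := List.idxOf_lt_length_of_mem hx
    obtain ⟨f, rfl⟩ : ∃ f, fuel = f + 1 := ⟨fuel - 1, by omega⟩
    have hcs : ∀ c ∈ (pvNT parent ns).getD x [], c ∈ pvS parent ns ∧
        (pvNPD parent ns).getD c none = some x ∧
        (pvS parent ns).idxOf x < (pvS parent ns).idxOf c := by
      intro c hc
      obtain ⟨hcS, hcnp⟩ := (pv_mem_nt parent ns hok x hx c).mp hc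
      have hc0 : c ≠ 0 := by
        intro h0; rw [h0, pv_npd_root parent ns hok] at hcnp; simp at hcnp
      obtain ⟨p, hp, hpS, hplt⟩ := pv_npd_step parent ns hok c hcS hc0
      rw [hp] at hcnp
      have hpx : p = x := by simpa using hcnp
      subst hpx
      exact ⟨hcS, hp, hplt⟩
    have hloop : ∀ (cs : List Int),
        (∀ c ∈ cs, c ∈ pvS parent ns ∧ (pvNPD parent ns).getD c none = some x ∧
          (pvS parent ns).idxOf x < (pvS parent ns).idxOf c) →
        ∀ (sz0 : List Int) (acc : Int), sz0.length = parent.length →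
          ((cs.foldl (fun (a : List Int × Int) child =>
              let r := pvA_dfsSize (pvNT parent ns) f child a.1
              (r.1, a.2 + r.2)) (sz0, acc)).2
            = acc + ((cs.map (fun c => (pvCnt parent ns c : Int))).sum)) ∧
          ((cs.foldl (fun (a : List Int × Int) child =>
              let r := pvA_dfsSize (pvNT parent ns) f child a.1
              (r.1, a.2 + r.2)) (sz0, acc)).1.length = sz0.length) ∧
          (∀ (j : Nat), j < sz0.length →
            PySem.List.pyGetD ((cs.foldl (fun (a : List Int × Int) child =>
                let r := pvA_dfsSize (pvNT parent ns) f child a.1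
                (r.1, a.2 + r.2)) (sz0, acc)).1) (j : Int) 0 =
              if ((j : Int) ∈ pvS parent ns ∧ ∃ c ∈ cs, c ∈ pvChain parent ns (j : Int))
                then (pvCnt parent ns (j : Int) : Int)
                else PySem.List.pyGetD sz0 (j : Int) 0) := by
      intro cs
      induction cs with
      | nil =>
        intro _ sz0 acc hlen
        refine ⟨by simp, rfl, ?_⟩
        intro j hj
        simp
      | cons c0 cs' ihc =>
        intro hmem sz0 acc hlen
        obtain ⟨hc0S, hc0np, hc0lt⟩ := hmem c0 (by simp)
        have hrec := ih c0 hc0S (by omega) f (by omega) sz0 hlen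
        simp only [List.foldl_cons]
        have hlen1 : (pvA_dfsSize (pvNT parent ns) f c0 sz0).1.length = parent.length := by
          rw [hrec.2.1, hlen]
        have hrest := ihc (fun c hc => hmem c (by simp [hc]))
          ((pvA_dfsSize (pvNT parent ns) f c0 sz0).1)
          (acc + (pvA_dfsSize (pvNT parent ns) f c0 sz0).2) hlen1
        refine ⟨?_, ?_, ?_⟩
        · rw [hrest.1, hrec.1]
          simp [List.sum_cons]
          ring
        · rw [hrest.2.1, hrec.2.1]
        · intro j hj
          have hj1 : j < (pvA_dfsSize (pvNT parent ns) f c0 sz0).1.length := by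
            rw [hrec.2.1]; exact hj
          rw [hrest.2.2 j (by rw [hrec.2.1]; exact hj)]
          rw [hrec.2.2 j hj]
          by_cases hS : (j : Int) ∈ pvS parent ns
          · by_cases h1 : ∃ c ∈ cs', c ∈ pvChain parent ns (j : Int) <;>
              by_cases h2 : c0 ∈ pvChain parent ns (j : Int)
            · simp only [hS, true_and, if_pos h1]
              rw [if_pos]
              obtain ⟨c, hc, hcm⟩ := h1
              exact ⟨c, by simp [hc], hcm⟩
            · simp only [hS, true_and, if_pos h1, if_neg h2]
              rw [if_pos]
              obtain ⟨c, hc, hcm⟩ := h1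
              exact ⟨c, by simp [hc], hcm⟩
            · simp only [hS, true_and, if_neg h1, if_pos h2]
              rw [if_pos]
              exact ⟨c0, by simp, h2⟩
            · simp only [hS, true_and, if_neg h1, if_neg h2]
              rw [if_neg]
              rintro ⟨c, hc, hcm⟩
              rcases List.mem_cons.mp hc with rfl | hc'
              · exact h2 hcm
              · exact h1 ⟨c, hc', hcm⟩
          · simp [hS]
    have hx0le : 0 ≤ x := (pvS_range parent ns hok x hx).1
    have hxn : x < (parent.length : Int) := (pvS_range parent ns hok x hx).2
    have hl := hloop ((pvNT parent ns).getD x []) hcs sz 1 hsz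
    rw [pvA_dfsSize_succ]
    have hsum : (((pvNT parent ns).getD x []).foldl (fun (a : List Int × Int) child =>
        let r := pvA_dfsSize (pvNT parent ns) f child a.1
        (r.1, a.2 + r.2)) (sz, 1)).2 = (pvCnt parent ns x : Int) := by
      rw [hl.1, pvCnt_node parent ns hok x hx]
      push_cast
      rw [List.map_map]
      simp [Function.comp_def]
    refine ⟨hsum, ?_, ?_⟩
    · simp only
      rw [PySem.List.length_pySetD, hl.2.1]
    · intro j hj
      simp only
      rw [hsum]
      have hjlt : j < (((pvNT parent ns).getD x []).foldl (fun (a : List Int × Int) child =>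
          let r := pvA_dfsSize (pvNT parent ns) f child a.1
          (r.1, a.2 + r.2)) (sz, 1)).1.length := by
        rw [hl.2.1]; exact hj
      rw [pv_getD_setD _ x _ hx0le j hjlt]
      by_cases hjx : (j : Int) = x
      · rw [if_pos hjx, if_pos]
        · rw [hjx]
        · rw [hjx]
          exact ⟨hx, pvChain_self parent ns hok x hx⟩
      · rw [if_neg hjx, hl.2.2 j hj]
        by_cases hS : (j : Int) ∈ pvS parent ns
        · have hiff := pvChain_via_children parent ns hok x hx (j : Int) hS
            (fun h => hjx (h.symm))
          by_cases hxc : x ∈ pvChain parent ns (j : Int)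
          · obtain ⟨c, hc1, hc2⟩ := hiff.mp hxc
            rw [if_pos ⟨hS, c, hc1, hc2⟩, if_pos ⟨hS, hxc⟩]
          · rw [if_neg, if_neg]
            · rintro ⟨_, hxc'⟩; exact hxc hxc'
            · rintro ⟨_, c, hc1, hc2⟩
              exact hxc (hiff.mpr ⟨c, hc1, hc2⟩)
        · rw [if_neg (fun h => hS h.1), if_neg (fun h => hS h.1)]

-- ===== B's counting loop =====
theorem pv_npd_nonneg (parent : List Int) (ns : List Char) (hok : pvOK parent ns) :
    ∀ x p, (pvNPD parent ns).getD x none = some p → 0 ≤ p := by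
  intro x p hp
  by_cases hx : x ∈ pvS parent ns
  · by_cases hx0 : x = 0
    · rw [hx0, pv_npd_root parent ns hok] at hp; simp at hp
    · obtain ⟨p', hp', hpS, _⟩ := pv_npd_step parent ns hok x hx hx0
      rw [hp'] at hp
      have hpp : p' = p := by simpa using hp
      subst hpp
      exact (pvS_range parent ns hok p' hpS).1
  · rw [pv_npd_not_mem parent ns x hx] at hp; simp at hp

theorem pvAncs_full (parent : List Int) (ns : List Char) (hok : pvOK parent ns)
    (u : Int) (hu : u ∈ pvS parent ns) :
    pvAncs (pvNPD parent ns) (parent.length+1) u = pvChain parent ns u := by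
  have h1 := List.idxOf_lt_length_of_mem hu
  have h2 := pvS_len_le parent ns hok
  exact pvAncs_stable parent ns hok ((pvS parent ns).idxOf u + 1) u hu (Nat.lt_succ_self _)
    (parent.length+1) ((pvS parent ns).length) (by omega) (by omega)

theorem pvB_fold_spec (parent : List Int) (ns : List Char) (hok : pvOK parent ns) :
    ∀ (us : List Int), (∀ u ∈ us, u ∈ pvS parent ns) →
      ∀ (sz : List Int),
        ((us.foldl (fun sz u => pvB_chase (pvNPD parent ns) (parent.length+1) u sz) sz).length
          = sz.length) ∧
        ∀ (j : Nat), j < sz.length →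
          PySem.List.pyGetD
              (us.foldl (fun sz u => pvB_chase (pvNPD parent ns) (parent.length+1) u sz) sz)
              (j : Int) 0
            = PySem.List.pyGetD sz (j : Int) 0
              + (us.countP (fun u => decide ((j : Int) ∈ pvChain parent ns u)) : Int) := by
  intro us
  induction us with
  | nil => intro _ sz; exact ⟨rfl, by intro j _; simp⟩
  | cons u0 us' ihu =>
    intro hmem sz
    simp only [List.foldl_cons]
    have hu0 := hmem u0 (by simp)
    have hrest := ihu (fun u hu => hmem u (by simp [hu]))
    refine ⟨?_, ?_⟩
    · rw [(hrest _).1, pvB_chase_len]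
    · intro j hj
      have hj1 : j < (pvB_chase (pvNPD parent ns) (parent.length+1) u0 sz).length := by
        rw [pvB_chase_len]; exact hj
      rw [(hrest _).2 j hj1]
      rw [pvB_chase_getD (pvNPD parent ns) (pv_npd_nonneg parent ns hok) _ u0
        (pvS_range parent ns hok u0 hu0).1 sz j hj]
      rw [pvAncs_full parent ns hok u0 hu0]
      rw [List.countP_cons]
      have hnd := pvChain_nodup parent ns hok ((pvS parent ns).idxOf u0 + 1) u0 hu0
        (Nat.lt_succ_self _)
      by_cases hjc : (j : Int) ∈ pvChain parent ns u0
      · rw [List.count_eq_one_of_mem hnd hjc]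
        simp [hjc]
        push_cast
        ring
      · rw [List.count_eq_zero_of_not_mem hjc]
        simp [hjc]

-- ===== the two ports agree =====
theorem pv_assembly (parent : List Int) (ns : List Char) (hok : pvOK parent ns) :
    (pvA_dfsSize (pvA_dfsUpdate parent ns (pvChildrenDict parent) (parent.length+1) 0
        (PySem.Dict.empty, PySem.Dict.empty)).1 (parent.length+1) 0
        (List.replicate parent.length 0)).1
    = ((pvB_dfs parent ns (pvChildrenDict parent) (parent.length+1) 0 PySem.Dict.empty
          (PySem.Dict.empty, [])).2).foldl
        (fun sz u => pvB_chase (pvB_dfs parent ns (pvChildrenDict parent) (parent.length+1) 0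
          PySem.Dict.empty (PySem.Dict.empty, [])).1 (parent.length+1) u sz)
        (List.replicate parent.length 0) := by
  obtain ⟨ca', hA, _⟩ := pvA_dfsUpdate_eq parent ns (pvChildrenDict parent) (parent.length+1) 0
    PySem.Dict.empty PySem.Dict.empty (fun _ => none) (fun c => PySem.Dict.get?_empty c)
  have hA1 : (pvA_dfsUpdate parent ns (pvChildrenDict parent) (parent.length+1) 0
      (PySem.Dict.empty, PySem.Dict.empty)).1 = pvNT parent ns := by
    rw [hA]
    rfl
  have hB := pvB_dfs_eq parent ns (pvChildrenDict parent) (parent.length+1) 0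
    PySem.Dict.empty (fun _ => none) (PySem.Dict.empty, []) (fun c => PySem.Dict.get?_empty c)
  have hB1 : (pvB_dfs parent ns (pvChildrenDict parent) (parent.length+1) 0 PySem.Dict.empty
      (PySem.Dict.empty, [])).1 = pvNPD parent ns := by
    rw [hB]
    rfl
  have hB2 : (pvB_dfs parent ns (pvChildrenDict parent) (parent.length+1) 0 PySem.Dict.empty
      (PySem.Dict.empty, [])).2 = pvS parent ns := by
    rw [hB]
    simp [pvS, pvVS]
  rw [hA1, hB1, hB2]
  obtain ⟨t, ht⟩ := pvS_hd parent ns hok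
  have h0S : (0 : Int) ∈ pvS parent ns := by rw [ht]; simp
  have hlen := pvS_len_le parent ns hok
  have hidx0 := List.idxOf_lt_length_of_mem h0S
  have hA' := pvA_dfsSize_spec parent ns hok ((pvS parent ns).length) 0 h0S (by omega)
    (parent.length+1) (by omega) (List.replicate parent.length 0) (by simp)
  have hB' := pvB_fold_spec parent ns hok (pvS parent ns) (fun u hu => hu)
    (List.replicate parent.length 0)
  apply List.ext_getElem
  · rw [hA'.2.1, hB'.1]
  · intro i h1 h2
    have hilt : i < parent.length := by
      rw [hA'.2.1] at h1
      simpa using h1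
    have hgA : (pvA_dfsSize (pvNT parent ns) (parent.length+1) 0
        (List.replicate parent.length 0)).1[i]
        = PySem.List.pyGetD ((pvA_dfsSize (pvNT parent ns) (parent.length+1) 0
            (List.replicate parent.length 0)).1) (i : Int) 0 := by
      rw [PySem.List.pyGetD_natCast, List.getD_eq_getElem]
    have hgB : ((pvS parent ns).foldl
        (fun sz u => pvB_chase (pvNPD parent ns) (parent.length+1) u sz)
        (List.replicate parent.length 0))[i]
        = PySem.List.pyGetD ((pvS parent ns).foldl
            (fun sz u => pvB_chase (pvNPD parent ns) (parent.length+1) u sz)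
            (List.replicate parent.length 0)) (i : Int) 0 := by
      rw [PySem.List.pyGetD_natCast, List.getD_eq_getElem]
    rw [hgA, hgB]
    rw [hA'.2.2 i (by simpa using hilt), hB'.2 i (by simpa using hilt)]
    have hrep : PySem.List.pyGetD (List.replicate parent.length (0 : Int)) (i : Int) 0 = 0 := by
      rw [PySem.List.pyGetD_natCast]
      simp [List.getD]
    rw [hrep]
    have hcntB : ((pvS parent ns).countP
        (fun u => decide ((i : Int) ∈ pvChain parent ns u)) : Int)
        = (pvCnt parent ns (i : Int) : Int) := by rfl
    rw [hcntB]
    by_cases hiS : (i : Int) ∈ pvS parent ns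
    · rw [if_pos ⟨hiS, pvChain_zero parent ns hok ((pvS parent ns).idxOf (i : Int) + 1)
        (i : Int) hiS (Nat.lt_succ_self _)⟩]
      simp
    · rw [if_neg (fun h => hiS h.1)]
      have hz : pvCnt parent ns (i : Int) = 0 := by
        unfold pvCnt
        rw [List.countP_eq_zero]
        intro u hu
        simp only [decide_eq_true_eq]
        intro hmem
        exact hiS (pvChain_subset parent ns hok ((pvS parent ns).idxOf u + 1) u hu
          (Nat.lt_succ_self _) _ hmem).1
      rw [hz]
      simp

-- ===== VERDICT (by name: the statement is the Claim_ definition above) =====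
theorem treeSubtreeSizes_spec : Claim_equal_treeSubtreeSizes := by
  intro parent s _ hpre
  show treeSubtreeSizes parent s = treeSubtreeSizes_alt parent s
  have hok : pvOK parent s.toList := by
    obtain ⟨h1, h2, h3⟩ := hpre
    refine ⟨h1, ?_, h3⟩
    rw [PySem.Str.len_eq] at h2
    exact_mod_cast h2
  exact pv_assembly parent s.toList hok
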